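-- pv_equiv track=rewrite | github.com/ArfaanFasal/Hackathon_thalashery | back-end/backend/civicsafe_brain/intent_behavior.py | _map_department
-- ===== SOURCE A (Python) =====
-- def _map_department(issue: str) -> str:
--     low = issue.lower()
--     if any(k in low for k in ("garbage", "sanitation", "waste", "sewage")):
--         return "Sanitation Department"
--     if any(k in low for k in ("electric", "power", "current", "wire")):
--         return "Electricity Board"
--     if any(k in low for k in ("water", "supply", "pipe")):
--         return "Water Authority"
--     if any(k in low for k in ("drain", "flood", "overflow")):
--         return "Drainage / Public Works"
--     if any(k in low for k in ("road", "pothole", "street light", "streetlight")):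
--         return "Public Works Department"
--     if any(k in low for k in ("revenue", "certificate", "income certificate", "permit")):
--         return "Revenue Department"
--     return "Municipal / Concerned Department"
-- ===== SOURCE B (Python) =====
-- _KEYWORD_RANK = {
--     "garbage": 0, "sanitation": 0, "waste": 0, "sewage": 0,
--     "electric": 1, "power": 1, "current": 1, "wire": 1,
--     "water": 2, "supply": 2, "pipe": 2,
--     "drain": 3, "flood": 3, "overflow": 3,
--     "road": 4, "pothole": 4, "street light": 4, "streetlight": 4,
--     "revenue": 5, "certificate": 5, "income certificate": 5, "permit": 5,
-- }
--
-- _DEPTS = [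
--     "Sanitation Department",
--     "Electricity Board",
--     "Water Authority",
--     "Drainage / Public Works",
--     "Public Works Department",
--     "Revenue Department",
--     "Municipal / Concerned Department",
-- ]
--
--
-- def _map_department(issue: str) -> str:
--     # One left-to-right scan: at every position record the best (lowest)
--     # priority of any keyword starting there; no per-department substring searches.
--     low = issue.lower()
--     best = 6
--     for i in range(len(low) + 1):
--         for k, r in _KEYWORD_RANK.items():
--             if r < best and low.startswith(k, i):
--                 best = r
--     return _DEPTS[best]
-- ===== Notes on version B (the rewrite author's own statement) =====
-- stated objective: alternative
-- what changed: B makes one left-to-right scan over the lowered string, at each position checking which entries of a flat keyword->priority table start there and keeping the minimum priority, then indexes a department table; A instead runs a chain of per-department whole-string substring searches with early return.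
import Mathlib
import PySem

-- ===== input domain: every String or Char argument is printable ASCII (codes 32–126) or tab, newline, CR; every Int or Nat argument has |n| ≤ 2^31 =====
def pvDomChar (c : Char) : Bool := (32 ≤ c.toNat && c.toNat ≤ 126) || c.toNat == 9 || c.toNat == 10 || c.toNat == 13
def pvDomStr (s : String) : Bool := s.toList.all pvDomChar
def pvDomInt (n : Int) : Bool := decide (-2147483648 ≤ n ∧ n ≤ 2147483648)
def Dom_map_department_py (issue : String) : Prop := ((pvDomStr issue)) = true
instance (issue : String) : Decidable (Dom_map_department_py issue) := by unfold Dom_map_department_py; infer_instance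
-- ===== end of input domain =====

-- B replaces A's chain of per-department substring searches by one left-to-right scan of the
-- lowered string keeping the minimum priority of any keyword starting at each position (alternative decomposition; same return value).

-- ===== PORT A =====
def map_department_py (issue : String) : String :=
  let low := PySem.Str.lower issue
  if PySem.Str.isIn "garbage" low || (PySem.Str.isIn "sanitation" low || (PySem.Str.isIn "waste" low || PySem.Str.isIn "sewage" low)) then
    "Sanitation Department"
  else if PySem.Str.isIn "electric" low || (PySem.Str.isIn "power" low || (PySem.Str.isIn "current" low || PySem.Str.isIn "wire" low)) then
    "Electricity Board"
  else if PySem.Str.isIn "water" low || (PySem.Str.isIn "supply" low || PySem.Str.isIn "pipe" low) then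
    "Water Authority"
  else if PySem.Str.isIn "drain" low || (PySem.Str.isIn "flood" low || PySem.Str.isIn "overflow" low) then
    "Drainage / Public Works"
  else if PySem.Str.isIn "road" low || (PySem.Str.isIn "pothole" low || (PySem.Str.isIn "street light" low || PySem.Str.isIn "streetlight" low)) then
    "Public Works Department"
  else if PySem.Str.isIn "revenue" low || (PySem.Str.isIn "certificate" low || (PySem.Str.isIn "income certificate" low || PySem.Str.isIn "permit" low)) then
    "Revenue Department"
  else "Municipal / Concerned Department"

-- ===== PORT B =====
-- flat keyword -> priority table (insertion order of Source B's dict)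
def pvKw : List (String × Nat) :=
  [("garbage", 0), ("sanitation", 0), ("waste", 0), ("sewage", 0),
   ("electric", 1), ("power", 1), ("current", 1), ("wire", 1),
   ("water", 2), ("supply", 2), ("pipe", 2),
   ("drain", 3), ("flood", 3), ("overflow", 3),
   ("road", 4), ("pothole", 4), ("street light", 4), ("streetlight", 4),
   ("revenue", 5), ("certificate", 5), ("income certificate", 5), ("permit", 5)]

def pvDepts : List String :=
  ["Sanitation Department", "Electricity Board", "Water Authority",
   "Drainage / Public Works", "Public Works Department", "Revenue Department",
   "Municipal / Concerned Department"]

-- inner loop of Source B: one pass over the table at the current position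
def pvInner (suf : List Char) (best : Nat) : Nat :=
  pvKw.foldl (fun b kr => if kr.2 < b && PySem.Chars.startswith suf kr.1.toList then kr.2 else b) best

-- outer loop of Source B: i = 0 .. len(low); position i is represented by the suffix low[i:]
def pvScan : List Char → Nat → Nat
  | [], best => pvInner [] best
  | c :: rest, best => pvScan rest (pvInner (c :: rest) best)

def map_department_py_alt (issue : String) : String :=
  pvDepts.getD (pvScan (PySem.Str.lower issue).toList 6) "Municipal / Concerned Department"

-- ===== PRECONDITION & SPEC =====
def Spec_map_department_py (issue : String) (out : String) : Prop := out = map_department_py_alt issue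
instance (issue : String) (out : String) : Decidable (Spec_map_department_py issue out) := by unfold Spec_map_department_py; infer_instance

-- ===== CLAIM (what is proved, stated in full; the proofs are below) =====
def Claim_equal_map_department_py : Prop := ∀ (issue : String), Dom_map_department_py issue → Spec_map_department_py issue (map_department_py issue)

-- ===== LEMMAS AND PROOFS =====

-- the inner fold only ever lowers the accumulator
theorem pvFold_le (L : List (String × Nat)) (suf : List Char) (b : Nat) :
    L.foldl (fun b kr => if kr.2 < b && PySem.Chars.startswith suf kr.1.toList then kr.2 else b) b ≤ b := by
  induction L generalizing b with
  | nil => simp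
  | cons k L ih =>
    simp only [List.foldl_cons]
    refine le_trans (ih _) ?_
    split <;> simp_all [Nat.le_of_lt]

theorem pvInner_le (suf : List Char) (b : Nat) : pvInner suf b ≤ b := pvFold_le _ _ _

theorem pvFold_min (L : List (String × Nat)) (suf : List Char) (b : Nat) (kr : String × Nat)
    (hmem : kr ∈ L) (hsw : PySem.Chars.startswith suf kr.1.toList = true) :
    L.foldl (fun b kr => if kr.2 < b && PySem.Chars.startswith suf kr.1.toList then kr.2 else b) b ≤ kr.2 := by
  induction L generalizing b with
  | nil => cases hmem
  | cons k L ih =>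
    simp only [List.foldl_cons]
    rcases List.mem_cons.mp hmem with h | h
    · subst h
      by_cases hlt : kr.2 < b
      · rw [if_pos (by rw [hsw]; simpa using hlt)]
        exact pvFold_le _ _ _
      · refine le_trans (pvFold_le _ _ _) ?_
        split <;> omega
    · exact ih _ h

theorem pvInner_min (suf : List Char) (b : Nat) (kr : String × Nat)
    (hmem : kr ∈ pvKw) (hsw : PySem.Chars.startswith suf kr.1.toList = true) :
    pvInner suf b ≤ kr.2 := pvFold_min _ _ _ _ hmem hsw

theorem pvFold_spec (L : List (String × Nat)) (suf : List Char) (b : Nat) :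
    (L.foldl (fun b kr => if kr.2 < b && PySem.Chars.startswith suf kr.1.toList then kr.2 else b) b = b)
    ∨ ∃ kr ∈ L, PySem.Chars.startswith suf kr.1.toList = true ∧
        L.foldl (fun b kr => if kr.2 < b && PySem.Chars.startswith suf kr.1.toList then kr.2 else b) b = kr.2 := by
  induction L generalizing b with
  | nil => left; simp
  | cons k L ih =>
    simp only [List.foldl_cons]
    by_cases hc : (k.2 < b && PySem.Chars.startswith suf k.1.toList) = true
    · rw [if_pos hc]
      have hsw2 : PySem.Chars.startswith suf k.1.toList = true := (Bool.and_eq_true _ _ |>.mp hc).2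
      rcases ih k.2 with h | ⟨kr, hm, hsw, he⟩
      · right; exact ⟨k, List.mem_cons_self, hsw2, h⟩
      · right; exact ⟨kr, List.mem_cons_of_mem _ hm, hsw, he⟩
    · rw [if_neg hc]
      rcases ih b with h | ⟨kr, hm, hsw, he⟩
      · left; exact h
      · right; exact ⟨kr, List.mem_cons_of_mem _ hm, hsw, he⟩

theorem pvInner_spec (suf : List Char) (b : Nat) :
    pvInner suf b = b ∨ ∃ kr ∈ pvKw, PySem.Chars.startswith suf kr.1.toList = true ∧ pvInner suf b = kr.2 :=
  pvFold_spec _ _ _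

theorem pvScan_le (s : List Char) (b : Nat) : pvScan s b ≤ b := by
  induction s generalizing b with
  | nil => exact pvInner_le _ _
  | cons c rest ih => exact le_trans (ih _) (pvInner_le _ _)

theorem pvScan_min (s : List Char) (b : Nat) (kr : String × Nat) (hmem : kr ∈ pvKw)
    (h : ∃ t, t <:+ s ∧ PySem.Chars.startswith t kr.1.toList = true) :
    pvScan s b ≤ kr.2 := by
  induction s generalizing b with
  | nil =>
    obtain ⟨t, hsuf, hsw⟩ := h
    rw [List.suffix_nil.mp hsuf] at hsw
    exact pvInner_min _ _ _ hmem hsw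
  | cons c rest ih =>
    obtain ⟨t, hsuf, hsw⟩ := h
    rcases List.suffix_cons_iff.mp hsuf with h1 | h1
    · subst h1
      simp only [pvScan]
      exact le_trans (pvScan_le rest _) (pvInner_min (c :: rest) b kr hmem hsw)
    · exact ih _ ⟨t, h1, hsw⟩

theorem pvScan_spec (s : List Char) (b : Nat) :
    pvScan s b = b ∨ ∃ kr ∈ pvKw, (∃ t, t <:+ s ∧ PySem.Chars.startswith t kr.1.toList = true) ∧ pvScan s b = kr.2 := by
  induction s generalizing b with
  | nil =>
    rcases pvInner_spec [] b with h | ⟨kr, hm, hsw, he⟩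
    · left; exact h
    · right; exact ⟨kr, hm, ⟨[], List.nil_suffix, hsw⟩, he⟩
  | cons c rest ih =>
    simp only [pvScan]
    rcases ih (pvInner (c :: rest) b) with h | ⟨kr, hm, ⟨t, hsuf, hsw⟩, he⟩
    · rcases pvInner_spec (c :: rest) b with h2 | ⟨kr, hm, hsw, he⟩
      · left; rw [h, h2]
      · right; exact ⟨kr, hm, ⟨c :: rest, List.suffix_refl _, hsw⟩, by rw [h, he]⟩
    · right; exact ⟨kr, hm, ⟨t, hsuf.trans (List.suffix_cons c rest), hsw⟩, he⟩

-- "some suffix starts with k"  =  "k occurs in s" (Python's `k in s`)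
theorem pvMatched_iff (k s : List Char) :
    (∃ t, t <:+ s ∧ PySem.Chars.startswith t k = true) ↔ PySem.Chars.isIn k s = true := by
  rw [← PySem.Chars.exists_prefix_drop_iff_isIn]
  constructor
  · rintro ⟨t, ⟨pre, rfl⟩, hsw⟩
    exact ⟨pre.length, by simpa [List.drop_left] using (PySem.Chars.startswith_iff _ _).mp hsw⟩
  · rintro ⟨j, hpre⟩
    exact ⟨s.drop j, List.drop_suffix j s, (PySem.Chars.startswith_iff _ _).mpr hpre⟩

theorem pvScan_le_of_isIn (s : List Char) (k : String) (r : Nat) (hmem : (k, r) ∈ pvKw)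
    (h : PySem.Chars.isIn k.toList s = true) : pvScan s 6 ≤ r :=
  pvScan_min s 6 (k, r) hmem ((pvMatched_iff _ _).mpr h)

theorem pvScan_eq_of (s : List Char) (i : Nat) (hi : i < 6) (hle : pvScan s 6 ≤ i)
    (hmin : ∀ kr, kr ∈ pvKw → PySem.Chars.isIn kr.1.toList s = true → i ≤ kr.2) :
    pvScan s 6 = i := by
  rcases pvScan_spec s 6 with h | ⟨kr, hm, hmat, h⟩
  · omega
  · have := hmin kr hm ((pvMatched_iff _ _).mp hmat)
    omega

theorem pvScan_eq_six (s : List Char)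
    (hnone : ∀ kr, kr ∈ pvKw → PySem.Chars.isIn kr.1.toList s = false) : pvScan s 6 = 6 := by
  rcases pvScan_spec s 6 with h | ⟨kr, hm, hmat, h⟩
  · exact h
  · have h2 := hnone kr hm
    rw [(pvMatched_iff _ _).mp hmat] at h2
    cases h2

theorem pvRank0 (s : List Char)  (h0 : (PySem.Chars.isIn "garbage".toList s || (PySem.Chars.isIn "sanitation".toList s || (PySem.Chars.isIn "waste".toList s || PySem.Chars.isIn "sewage".toList s))) = true) :
    pvScan s 6 = 0 := by
  refine pvScan_eq_of s 0 (by omega) ?_ ?_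
  · simp only [Bool.or_eq_true] at h0
    rcases h0 with h|h|h|h
    · exact pvScan_le_of_isIn s "garbage" 0 (by decide) h
    · exact pvScan_le_of_isIn s "sanitation" 0 (by decide) h
    · exact pvScan_le_of_isIn s "waste" 0 (by decide) h
    · exact pvScan_le_of_isIn s "sewage" 0 (by decide) h
  · intro kr hm hin
    simp only [pvKw, List.mem_cons, List.not_mem_nil, or_false] at hm
    rcases hm with rfl|rfl|rfl|rfl|rfl|rfl|rfl|rfl|rfl|rfl|rfl|rfl|rfl|rfl|rfl|rfl|rfl|rfl|rfl|rfl|rfl|rfl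
    all_goals dsimp only at hin ⊢
    all_goals omega

theorem pvRank1 (s : List Char) (h0 : ¬ (PySem.Chars.isIn "garbage".toList s || (PySem.Chars.isIn "sanitation".toList s || (PySem.Chars.isIn "waste".toList s || PySem.Chars.isIn "sewage".toList s))) = true) (h1 : (PySem.Chars.isIn "electric".toList s || (PySem.Chars.isIn "power".toList s || (PySem.Chars.isIn "current".toList s || PySem.Chars.isIn "wire".toList s))) = true) :
    pvScan s 6 = 1 := by
  refine pvScan_eq_of s 1 (by omega) ?_ ?_
  · simp only [Bool.or_eq_true] at h1
    rcases h1 with h|h|h|h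
    · exact pvScan_le_of_isIn s "electric" 1 (by decide) h
    · exact pvScan_le_of_isIn s "power" 1 (by decide) h
    · exact pvScan_le_of_isIn s "current" 1 (by decide) h
    · exact pvScan_le_of_isIn s "wire" 1 (by decide) h
  · intro kr hm hin
    simp only [Bool.or_eq_true, not_or, Bool.not_eq_true] at h0
    simp only [pvKw, List.mem_cons, List.not_mem_nil, or_false] at hm
    rcases hm with rfl|rfl|rfl|rfl|rfl|rfl|rfl|rfl|rfl|rfl|rfl|rfl|rfl|rfl|rfl|rfl|rfl|rfl|rfl|rfl|rfl|rfl
    all_goals dsimp only at hin ⊢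
    all_goals first | omega | simp_all

theorem pvRank2 (s : List Char) (h0 : ¬ (PySem.Chars.isIn "garbage".toList s || (PySem.Chars.isIn "sanitation".toList s || (PySem.Chars.isIn "waste".toList s || PySem.Chars.isIn "sewage".toList s))) = true) (h1 : ¬ (PySem.Chars.isIn "electric".toList s || (PySem.Chars.isIn "power".toList s || (PySem.Chars.isIn "current".toList s || PySem.Chars.isIn "wire".toList s))) = true) (h2 : (PySem.Chars.isIn "water".toList s || (PySem.Chars.isIn "supply".toList s || PySem.Chars.isIn "pipe".toList s)) = true) :
    pvScan s 6 = 2 := by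
  refine pvScan_eq_of s 2 (by omega) ?_ ?_
  · simp only [Bool.or_eq_true] at h2
    rcases h2 with h|h|h
    · exact pvScan_le_of_isIn s "water" 2 (by decide) h
    · exact pvScan_le_of_isIn s "supply" 2 (by decide) h
    · exact pvScan_le_of_isIn s "pipe" 2 (by decide) h
  · intro kr hm hin
    simp only [Bool.or_eq_true, not_or, Bool.not_eq_true] at h0 h1
    simp only [pvKw, List.mem_cons, List.not_mem_nil, or_false] at hm
    rcases hm with rfl|rfl|rfl|rfl|rfl|rfl|rfl|rfl|rfl|rfl|rfl|rfl|rfl|rfl|rfl|rfl|rfl|rfl|rfl|rfl|rfl|rfl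
    all_goals dsimp only at hin ⊢
    all_goals first | omega | simp_all

theorem pvRank3 (s : List Char) (h0 : ¬ (PySem.Chars.isIn "garbage".toList s || (PySem.Chars.isIn "sanitation".toList s || (PySem.Chars.isIn "waste".toList s || PySem.Chars.isIn "sewage".toList s))) = true) (h1 : ¬ (PySem.Chars.isIn "electric".toList s || (PySem.Chars.isIn "power".toList s || (PySem.Chars.isIn "current".toList s || PySem.Chars.isIn "wire".toList s))) = true) (h2 : ¬ (PySem.Chars.isIn "water".toList s || (PySem.Chars.isIn "supply".toList s || PySem.Chars.isIn "pipe".toList s)) = true) (h3 : (PySem.Chars.isIn "drain".toList s || (PySem.Chars.isIn "flood".toList s || PySem.Chars.isIn "overflow".toList s)) = true) :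
    pvScan s 6 = 3 := by
  refine pvScan_eq_of s 3 (by omega) ?_ ?_
  · simp only [Bool.or_eq_true] at h3
    rcases h3 with h|h|h
    · exact pvScan_le_of_isIn s "drain" 3 (by decide) h
    · exact pvScan_le_of_isIn s "flood" 3 (by decide) h
    · exact pvScan_le_of_isIn s "overflow" 3 (by decide) h
  · intro kr hm hin
    simp only [Bool.or_eq_true, not_or, Bool.not_eq_true] at h0 h1 h2
    simp only [pvKw, List.mem_cons, List.not_mem_nil, or_false] at hm
    rcases hm with rfl|rfl|rfl|rfl|rfl|rfl|rfl|rfl|rfl|rfl|rfl|rfl|rfl|rfl|rfl|rfl|rfl|rfl|rfl|rfl|rfl|rfl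
    all_goals dsimp only at hin ⊢
    all_goals first | omega | simp_all

theorem pvRank4 (s : List Char) (h0 : ¬ (PySem.Chars.isIn "garbage".toList s || (PySem.Chars.isIn "sanitation".toList s || (PySem.Chars.isIn "waste".toList s || PySem.Chars.isIn "sewage".toList s))) = true) (h1 : ¬ (PySem.Chars.isIn "electric".toList s || (PySem.Chars.isIn "power".toList s || (PySem.Chars.isIn "current".toList s || PySem.Chars.isIn "wire".toList s))) = true) (h2 : ¬ (PySem.Chars.isIn "water".toList s || (PySem.Chars.isIn "supply".toList s || PySem.Chars.isIn "pipe".toList s)) = true) (h3 : ¬ (PySem.Chars.isIn "drain".toList s || (PySem.Chars.isIn "flood".toList s || PySem.Chars.isIn "overflow".toList s)) = true) (h4 : (PySem.Chars.isIn "road".toList s || (PySem.Chars.isIn "pothole".toList s || (PySem.Chars.isIn "street light".toList s || PySem.Chars.isIn "streetlight".toList s))) = true) :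
    pvScan s 6 = 4 := by
  refine pvScan_eq_of s 4 (by omega) ?_ ?_
  · simp only [Bool.or_eq_true] at h4
    rcases h4 with h|h|h|h
    · exact pvScan_le_of_isIn s "road" 4 (by decide) h
    · exact pvScan_le_of_isIn s "pothole" 4 (by decide) h
    · exact pvScan_le_of_isIn s "street light" 4 (by decide) h
    · exact pvScan_le_of_isIn s "streetlight" 4 (by decide) h
  · intro kr hm hin
    simp only [Bool.or_eq_true, not_or, Bool.not_eq_true] at h0 h1 h2 h3
    simp only [pvKw, List.mem_cons, List.not_mem_nil, or_false] at hm
    rcases hm with rfl|rfl|rfl|rfl|rfl|rfl|rfl|rfl|rfl|rfl|rfl|rfl|rfl|rfl|rfl|rfl|rfl|rfl|rfl|rfl|rfl|rfl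
    all_goals dsimp only at hin ⊢
    all_goals first | omega | simp_all

theorem pvRank5 (s : List Char) (h0 : ¬ (PySem.Chars.isIn "garbage".toList s || (PySem.Chars.isIn "sanitation".toList s || (PySem.Chars.isIn "waste".toList s || PySem.Chars.isIn "sewage".toList s))) = true) (h1 : ¬ (PySem.Chars.isIn "electric".toList s || (PySem.Chars.isIn "power".toList s || (PySem.Chars.isIn "current".toList s || PySem.Chars.isIn "wire".toList s))) = true) (h2 : ¬ (PySem.Chars.isIn "water".toList s || (PySem.Chars.isIn "supply".toList s || PySem.Chars.isIn "pipe".toList s)) = true) (h3 : ¬ (PySem.Chars.isIn "drain".toList s || (PySem.Chars.isIn "flood".toList s || PySem.Chars.isIn "overflow".toList s)) = true) (h4 : ¬ (PySem.Chars.isIn "road".toList s || (PySem.Chars.isIn "pothole".toList s || (PySem.Chars.isIn "street light".toList s || PySem.Chars.isIn "streetlight".toList s))) = true) (h5 : (PySem.Chars.isIn "revenue".toList s || (PySem.Chars.isIn "certificate".toList s || (PySem.Chars.isIn "income certificate".toList s || PySem.Chars.isIn "permit".toList s))) = true) :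
    pvScan s 6 = 5 := by
  refine pvScan_eq_of s 5 (by omega) ?_ ?_
  · simp only [Bool.or_eq_true] at h5
    rcases h5 with h|h|h|h
    · exact pvScan_le_of_isIn s "revenue" 5 (by decide) h
    · exact pvScan_le_of_isIn s "certificate" 5 (by decide) h
    · exact pvScan_le_of_isIn s "income certificate" 5 (by decide) h
    · exact pvScan_le_of_isIn s "permit" 5 (by decide) h
  · intro kr hm hin
    simp only [Bool.or_eq_true, not_or, Bool.not_eq_true] at h0 h1 h2 h3 h4
    simp only [pvKw, List.mem_cons, List.not_mem_nil, or_false] at hm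
    rcases hm with rfl|rfl|rfl|rfl|rfl|rfl|rfl|rfl|rfl|rfl|rfl|rfl|rfl|rfl|rfl|rfl|rfl|rfl|rfl|rfl|rfl|rfl
    all_goals dsimp only at hin ⊢
    all_goals first | omega | simp_all

theorem pvRank6 (s : List Char) (h0 : ¬ (PySem.Chars.isIn "garbage".toList s || (PySem.Chars.isIn "sanitation".toList s || (PySem.Chars.isIn "waste".toList s || PySem.Chars.isIn "sewage".toList s))) = true) (h1 : ¬ (PySem.Chars.isIn "electric".toList s || (PySem.Chars.isIn "power".toList s || (PySem.Chars.isIn "current".toList s || PySem.Chars.isIn "wire".toList s))) = true) (h2 : ¬ (PySem.Chars.isIn "water".toList s || (PySem.Chars.isIn "supply".toList s || PySem.Chars.isIn "pipe".toList s)) = true) (h3 : ¬ (PySem.Chars.isIn "drain".toList s || (PySem.Chars.isIn "flood".toList s || PySem.Chars.isIn "overflow".toList s)) = true) (h4 : ¬ (PySem.Chars.isIn "road".toList s || (PySem.Chars.isIn "pothole".toList s || (PySem.Chars.isIn "street light".toList s || PySem.Chars.isIn "streetlight".toList s))) = true) (h5 : ¬ (PySem.Chars.isIn "revenue".toList s ||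 (PySem.Chars.isIn "certificate".toList s || (PySem.Chars.isIn "income certificate".toList s || PySem.Chars.isIn "permit".toList s))) = true) :
    pvScan s 6 = 6 := by
  apply pvScan_eq_six
  intro kr hm
  simp only [Bool.or_eq_true, not_or, Bool.not_eq_true] at h0 h1 h2 h3 h4 h5
  simp only [pvKw, List.mem_cons, List.not_mem_nil, or_false] at hm
  rcases hm with rfl|rfl|rfl|rfl|rfl|rfl|rfl|rfl|rfl|rfl|rfl|rfl|rfl|rfl|rfl|rfl|rfl|rfl|rfl|rfl|rfl|rfl
  all_goals dsimp only
  all_goals simp_all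

-- ===== VERDICT (by name: the statement is the Claim_ definition above) =====
theorem map_department_py_spec : Claim_equal_map_department_py := by
  intro issue _
  unfold Spec_map_department_py map_department_py map_department_py_alt
  simp only [PySem.Str.isIn_eq]
  set s := (PySem.Str.lower issue).toList with hs
  split_ifs with h0 h1 h2 h3 h4 h5
  · rw [pvRank0 s h0]; rfl
  · rw [pvRank1 s h0 h1]; rfl
  · rw [pvRank2 s h0 h1 h2]; rfl
  · rw [pvRank3 s h0 h1 h2 h3]; rfl
  · rw [pvRank4 s h0 h1 h2 h3 h4]; rfl
  · rw [pvRank5 s h0 h1 h2 h3 h4 h5]; rfl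
  · rw [pvRank6 s h0 h1 h2 h3 h4 h5]; rfl
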